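-- pv_equiv track=rewrite | github.com/ishmeet2001/U.S.-Multi-State-Violent-Crime-Analysis | Data-Collection/Transform & Load/cleaning_scripts/ETL_C_std.py | find_age_columns
-- ===== SOURCE A (Python) =====
-- def find_age_columns(columns):
--     victim_col = None
--     offender_col = None
--
--     for col in columns:
--         lower = col.lower()
--         if victim_col is None and "victim" in lower and "age" in lower:
--             victim_col = col
--         if offender_col is None and "offender" in lower and "age" in lower:
--             offender_col = col
--
--     return victim_col, offender_col
-- ===== SOURCE B (Python) =====
-- def find_age_columns(columns):
--     victim_col = next((c for c in columns
--                        if "victim" in c.lower() and "age" in c.lower()), None)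
--     offender_col = next((c for c in columns
--                          if "offender" in c.lower() and "age" in c.lower()), None)
--     return victim_col, offender_col
-- ===== Notes on version B (the rewrite author's own statement) =====
-- stated objective: simpler
-- what changed: Replaces A's one fused loop that threads two None-guarded accumulators with two independent short-circuiting first-match scans (next over a generator) whose results are returned as the tuple.
import Mathlib
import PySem

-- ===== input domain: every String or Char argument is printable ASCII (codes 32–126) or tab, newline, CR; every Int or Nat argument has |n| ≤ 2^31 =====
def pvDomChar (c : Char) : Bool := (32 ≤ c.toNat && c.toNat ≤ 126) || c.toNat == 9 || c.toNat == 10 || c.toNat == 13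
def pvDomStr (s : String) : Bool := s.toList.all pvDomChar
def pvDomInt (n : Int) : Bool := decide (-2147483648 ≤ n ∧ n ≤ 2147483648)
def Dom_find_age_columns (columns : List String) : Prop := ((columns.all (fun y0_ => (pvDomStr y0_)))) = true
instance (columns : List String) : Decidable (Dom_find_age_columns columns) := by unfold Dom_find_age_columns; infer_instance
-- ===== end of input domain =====

-- B replaces A's single fused loop with two independent first-match scans over the columns (objective: simpler).
-- ===== PORT A =====
def find_age_columns (columns : List String) : Option String × Option String :=
  columns.foldl
    (fun st col =>
      let lower := PySem.Str.lower col
      let st1 := if st.1 = none ∧ PySem.Str.isIn "victim" lower = true ∧ PySem.Str.isIn "age" lower = true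
                 then (some col, st.2) else st
      if st1.2 = none ∧ PySem.Str.isIn "offender" lower = true ∧ PySem.Str.isIn "age" lower = true
      then (st1.1, some col) else st1)
    (none, none)

-- ===== PORT B =====
def find_age_columns_alt (columns : List String) : Option String × Option String :=
  (columns.find? (fun c => PySem.Str.isIn "victim" (PySem.Str.lower c) && PySem.Str.isIn "age" (PySem.Str.lower c)),
   columns.find? (fun c => PySem.Str.isIn "offender" (PySem.Str.lower c) && PySem.Str.isIn "age" (PySem.Str.lower c)))

-- ===== PRECONDITION & SPEC =====
def Spec_find_age_columns (columns : List String) (out : Option String × Option String) : Prop := out = find_age_columns_alt columns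
instance (columns : List String) (out : Option String × Option String) : Decidable (Spec_find_age_columns columns out) := by unfold Spec_find_age_columns; infer_instance

-- ===== CLAIM (what is proved, stated in full; the proofs are below) =====
def Claim_equal_find_age_columns : Prop := ∀ (columns : List String), Dom_find_age_columns columns → Spec_find_age_columns columns (find_age_columns columns)

-- ===== LEMMAS AND PROOFS =====

-- ===== VERDICT (by name: the statement is the Claim_ definition above) =====
-- The fused fold, from any pair state and any three predicates, equals the pair of
-- "keep if already set, else first match" scans.
theorem fold_pair_eq (pV pO pA : String → Bool) (l : List String) (v o : Option String) :
    l.foldl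
      (fun st col =>
        let st1 := if st.1 = none ∧ pV col = true ∧ pA col = true then (some col, st.2) else st
        if st1.2 = none ∧ pO col = true ∧ pA col = true then (st1.1, some col) else st1)
      (v, o)
    = (v.orElse (fun _ => l.find? (fun c => pV c && pA c)),
       o.orElse (fun _ => l.find? (fun c => pO c && pA c))) := by
  induction l generalizing v o with
  | nil => cases v <;> cases o <;> rfl
  | cons hd tl ih =>
    simp only [List.foldl_cons, List.find?_cons]
    cases v <;> cases o <;>
      by_cases hv : pV hd = true <;>
      by_cases ho : pO hd = true <;>
      by_cases ha : pA hd = true <;>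
      simp [hv, ho, ha, ih, Option.orElse]

theorem find_age_columns_spec : Claim_equal_find_age_columns := by
  intro columns _
  simp only [Spec_find_age_columns, find_age_columns, find_age_columns_alt]
  have h := fold_pair_eq (fun c => PySem.Str.isIn "victim" (PySem.Str.lower c))
    (fun c => PySem.Str.isIn "offender" (PySem.Str.lower c))
    (fun c => PySem.Str.isIn "age" (PySem.Str.lower c)) columns none none
  simp only [Option.orElse] at h
  exact h
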